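-- pv_equiv track=rewrite | github.com/dmartinezc1/VizinhoHackathon | MenuOpciones.py | limpiarUser
-- ===== SOURCE A (Python) =====
-- def limpiarUser(usuario):
--
--     respuesta=""
--
--     for i in range (len(usuario)):
--         if usuario[i]=="@":
--             return respuesta
--         else:
--             respuesta= respuesta + usuario[i]
--
--     return usuario
-- ===== SOURCE B (Python) =====
-- def limpiarUser(usuario):
--     pos = usuario.find('@')
--     if pos == -1:
--         return usuario
--     return usuario[:pos]
-- ===== Notes on version B (the rewrite author's own statement) =====
-- stated objective: simpler
-- what changed: Replaces the character-by-character prefix-accumulation loop with a single find of the first '@' followed by one slice (return the whole string when there is no '@').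
import Mathlib
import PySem

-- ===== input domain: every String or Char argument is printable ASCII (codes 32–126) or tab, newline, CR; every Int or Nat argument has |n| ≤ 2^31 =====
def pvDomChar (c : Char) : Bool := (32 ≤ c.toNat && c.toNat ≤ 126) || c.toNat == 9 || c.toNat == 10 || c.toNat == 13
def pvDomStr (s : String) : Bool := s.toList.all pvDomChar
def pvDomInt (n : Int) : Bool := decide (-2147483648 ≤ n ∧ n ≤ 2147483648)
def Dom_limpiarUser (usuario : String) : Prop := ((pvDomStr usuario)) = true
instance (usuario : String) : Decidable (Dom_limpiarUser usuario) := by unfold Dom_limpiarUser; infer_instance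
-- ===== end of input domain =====

-- B replaces A's character-by-character prefix-accumulation loop with one find('@') then one slice; objective: simpler.

-- ===== PORT A =====
-- the for-loop over range(len(usuario)) with accumulator `respuesta` and early return at '@'
def limpiarUserGo (respuesta : List Char) : List Char → Option (List Char)
  | [] => none
  | c :: rest => if c = '@' then some respuesta else limpiarUserGo (respuesta ++ [c]) rest

def limpiarUser (usuario : String) : String :=
  match limpiarUserGo [] usuario.toList with
  | some respuesta => String.ofList respuesta
  | none => usuario

-- ===== PORT B =====
def limpiarUser_alt (usuario : String) : String :=
  let pos := PySem.Str.find usuario "@"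
  if pos = -1 then usuario else PySem.Str.slice usuario none (some pos)

-- ===== PRECONDITION & SPEC =====
def Spec_limpiarUser (usuario : String) (out : String) : Prop := out = limpiarUser_alt usuario
instance (usuario : String) (out : String) : Decidable (Spec_limpiarUser usuario out) := by unfold Spec_limpiarUser; infer_instance

-- ===== CLAIM (what is proved, stated in full; the proofs are below) =====
def Claim_equal_limpiarUser : Prop := ∀ (usuario : String), Dom_limpiarUser usuario → Spec_limpiarUser usuario (limpiarUser usuario)

-- ===== LEMMAS AND PROOFS =====

theorem singleton_infix_iff_mem (a : Char) (l : List Char) : [a] <:+: l ↔ a ∈ l := by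
  constructor
  · intro h; exact h.sublist.subset (List.mem_singleton_self a)
  · intro h
    obtain ⟨s, t, hst⟩ := List.append_of_mem h
    exact ⟨s, t, by simp [hst]⟩

theorem singleton_prefix_iff (a : Char) (l : List Char) : [a] <+: l ↔ l[0]? = some a := by
  cases l with
  | nil => simp
  | cons c rest =>
    constructor
    · rintro ⟨t, ht⟩; simp at ht; simp [ht.1]
    · intro h; simp at h; exact ⟨rest, by simp [h]⟩

theorem go_spec (cs : List Char) : ∀ acc, limpiarUserGo acc cs =
    if '@' ∈ cs then some (acc ++ cs.takeWhile (fun c => c ≠ '@')) else none := by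
  induction cs with
  | nil => intro acc; simp [limpiarUserGo]
  | cons c rest ih =>
    intro acc
    by_cases hc : c = '@'
    · simp [limpiarUserGo, hc, List.takeWhile]
    · simp only [limpiarUserGo, if_neg hc, ih, List.mem_cons]
      by_cases hm : '@' ∈ rest
      · simp [hm, Ne.symm hc, List.takeWhile, hc]
      · simp [hm, Ne.symm hc]

theorem takeWhile_eq_take (cs : List Char) : ∀ n : Nat, cs[n]? = some '@' →
    (∀ i < n, cs[i]? ≠ some '@') →
    cs.takeWhile (fun c => c ≠ '@') = cs.take n := by
  induction cs with
  | nil => intro n hn _; simp at hn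
  | cons c rest ih =>
    intro n hn hlt
    cases n with
    | zero => simp at hn; simp [List.takeWhile, hn]
    | succ m =>
      have hc : c ≠ '@' := by
        intro h; exact hlt 0 (Nat.succ_pos m) (by simp [h])
      simp only [List.getElem?_cons_succ] at hn
      have hrest := ih m hn (fun i hi => by
        have := hlt (i + 1) (Nat.succ_lt_succ hi)
        simpa using this)
      simp only [ne_eq, decide_not] at hrest
      simp [List.takeWhile, hc, hrest]

-- ===== VERDICT (by name: the statement is the Claim_ definition above) =====
theorem limpiarUser_spec : Claim_equal_limpiarUser := by
  intro usuario _
  unfold Spec_limpiarUser limpiarUser limpiarUser_alt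
  have hdef : PySem.Str.find usuario "@" = PySem.Chars.find usuario.toList ['@'] := rfl
  simp only [hdef]
  by_cases hm : '@' ∈ usuario.toList
  · have hne : PySem.Chars.find usuario.toList ['@'] ≠ -1 := by
      rw [Ne, PySem.Chars.find_eq_neg_one_iff, singleton_infix_iff_mem]
      exact not_not_intro hm
    have hnonneg : 0 ≤ PySem.Chars.find usuario.toList ['@'] := by
      have := PySem.Chars.neg_one_le_find (s := usuario.toList) (sub := ['@'])
      omega
    obtain ⟨hpre, hmin⟩ := PySem.Chars.find_spec hnonneg
    have hcast : PySem.Chars.find usuario.toList ['@']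
        = (((PySem.Chars.find usuario.toList ['@']).toNat : Nat) : Int) :=
      (Int.toNat_of_nonneg hnonneg).symm
    have hat : usuario.toList[(PySem.Chars.find usuario.toList ['@']).toNat]? = some '@' := by
      have h0 := (singleton_prefix_iff '@' _).mp hpre
      simpa using h0
    have hbefore : ∀ i < (PySem.Chars.find usuario.toList ['@']).toNat,
        usuario.toList[i]? ≠ some '@' := by
      intro i hi h
      apply hmin i hi
      rw [singleton_prefix_iff]
      simpa using h
    have htake := takeWhile_eq_take usuario.toList _ hat hbefore
    rw [go_spec _ [], if_pos hm, if_neg hne]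
    apply String.toList_injective
    rw [PySem.Str.toList_slice, hcast, PySem.Chars.slice_eq_listSlice, PySem.List.slice_to_natCast]
    simpa using htake
  · have heq : PySem.Chars.find usuario.toList ['@'] = -1 := by
      rw [PySem.Chars.find_eq_neg_one_iff, singleton_infix_iff_mem]; exact hm
    rw [go_spec _ [], if_neg hm, if_pos heq]
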